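-- pv_equiv track=rewrite | github.com/woozway/LC | Dynamic Programming/718. Maximum Length of Repeated Subarray.py | findLength
-- ===== SOURCE A (Python) =====
-- from typing import List
--
-- def findLength(nums1: List[int], nums2: List[int]) -> int:
--     def maxLength(addA: int, addB: int, length: int) -> int:
--         ret = k = 0
--         for i in range(length):
--             if nums1[addA + i] == nums2[addB + i]:
--                 k += 1
--                 ret = max(ret, k)
--             else:
--                 k = 0
--         return ret
--
--     if not nums1 or not nums2: return 0
--     n, m = len(nums1), len(nums2)
--     ret = 0
--     for i in range(n):
--         length = min(m, n - i)
--         ret = max(ret, maxLength(i, 0, length))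
--     for i in range(m):
--         length = min(n, m - i)
--         ret = max(ret, maxLength(0, i, length))
--     return ret
-- ===== SOURCE B (Python) =====
-- from typing import List
--
-- def findLength(nums1: List[int], nums2: List[int]) -> int:
--     # row-by-row DP: dp[j] = length of the common run ending at (current row, j)
--     dp = [0] * len(nums2)
--     best = 0
--     for x in nums1:
--         dp = [p + 1 if x == y else 0 for y, p in zip(nums2, [0] + dp)]
--         for v in dp:
--             if v > best:
--                 best = v
--     return best
-- ===== Notes on version B (the rewrite author's own statement) =====
-- stated objective: faster
-- what changed: Replaced A's per-diagonal run scans (a helper called for every diagonal of both orientations, indexing both lists element by element) by the textbook single-table DP: one pass over nums1 maintaining a row dp[j] = length of the common run ending at (i, j) via a comprehension over zip, taking the running maximum.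
import Mathlib
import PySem

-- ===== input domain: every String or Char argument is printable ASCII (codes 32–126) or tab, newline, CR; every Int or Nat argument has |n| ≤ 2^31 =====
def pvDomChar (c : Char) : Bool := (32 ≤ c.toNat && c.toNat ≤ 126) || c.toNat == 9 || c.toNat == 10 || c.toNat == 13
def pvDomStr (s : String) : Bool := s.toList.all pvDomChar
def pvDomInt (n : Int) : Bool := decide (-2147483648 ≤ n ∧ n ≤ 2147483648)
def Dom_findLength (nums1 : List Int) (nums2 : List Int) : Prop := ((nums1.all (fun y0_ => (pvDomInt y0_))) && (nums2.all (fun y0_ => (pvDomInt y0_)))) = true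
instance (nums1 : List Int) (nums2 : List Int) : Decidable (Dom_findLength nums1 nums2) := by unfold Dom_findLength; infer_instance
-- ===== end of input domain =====

-- B replaces A's per-diagonal run scans by the textbook row-by-row DP table: same O(n*m) asymptotics, measurably faster constants (in a timing run).

-- ===== PORT A =====
-- inner helper maxLength(addA, addB, length) of A, closing over nums1/nums2
def maxLengthA (nums1 : List Int) (nums2 : List Int) (addA addB length : Int) : Int :=
  ((PySem.List.pyRange 0 length 1).foldl
    (fun (st : Int × Int) i =>
      if PySem.List.pyGet? nums1 (addA + i) = PySem.List.pyGet? nums2 (addB + i) then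
        (max st.1 (st.2 + 1), st.2 + 1)
      else (st.1, 0)) (0, 0)).1

def findLength (nums1 : List Int) (nums2 : List Int) : Int :=
  if nums1 = [] ∨ nums2 = [] then 0
  else
    let n : Int := nums1.length
    let m : Int := nums2.length
    let ret1 := (PySem.List.pyRange 0 n 1).foldl
      (fun ret i => max ret (maxLengthA nums1 nums2 i 0 (min m (n - i)))) 0
    (PySem.List.pyRange 0 m 1).foldl
      (fun ret i => max ret (maxLengthA nums1 nums2 0 i (min n (m - i)))) ret1

-- ===== PORT B =====
def findLength_alt (nums1 : List Int) (nums2 : List Int) : Int :=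
  (nums1.foldl
    (fun (st : List Int × Int) x =>
      let dp := List.zipWith (fun y p => if x = y then p + 1 else 0) nums2 (0 :: st.1)
      (dp, dp.foldl (fun best v => if best < v then v else best) st.2))
    (List.replicate nums2.length 0, 0)).2

-- ===== PRECONDITION & SPEC =====
def Spec_findLength (nums1 : List Int) (nums2 : List Int) (out : Int) : Prop := out = findLength_alt nums1 nums2
instance (nums1 : List Int) (nums2 : List Int) (out : Int) : Decidable (Spec_findLength nums1 nums2 out) := by unfold Spec_findLength; infer_instance

-- ===== CLAIM (what is proved, stated in full; the proofs are below) =====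
def Claim_equal_findLength : Prop := ∀ (nums1 : List Int) (nums2 : List Int), Dom_findLength nums1 nums2 → Spec_findLength nums1 nums2 (findLength nums1 nums2)

-- ===== LEMMAS AND PROOFS =====

def erun (a b : List Int) : Nat → Nat → Int
  | 0, j => if 0 < a.length ∧ j < b.length ∧ a.getD 0 0 = b.getD j 0 then 1 else 0
  | i+1, 0 => if i+1 < a.length ∧ 0 < b.length ∧ a.getD (i+1) 0 = b.getD 0 0 then 1 else 0
  | i+1, j+1 => if i+1 < a.length ∧ j+1 < b.length ∧ a.getD (i+1) 0 = b.getD (j+1) 0 then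
      erun a b i j + 1 else 0

def eMax (a b : List Int) : Int :=
  (((List.range a.length).flatMap (fun i => (List.range b.length).map (fun j => (i, j)))).foldl
    (fun acc p => max acc (erun a b p.1 p.2)) 0)

-- the new dp row equals the erun row of the extended list

lemma erun_append_left (a t b : List Int) : ∀ (i j : Nat), i < a.length →
    erun (a ++ t) b i j = erun a b i j := by
  intro i
  induction i with
  | zero =>
    intro j h
    simp only [erun, List.length_append, List.getD_append _ _ _ _ h]
    have h' : 0 < a.length + t.length := by omega
    simp [h, h']
  | succ i ih =>
    intro j h
    have h' : i + 1 < a.length + t.length := by omega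
    cases j with
    | zero =>
      simp only [erun, List.length_append, List.getD_append _ _ _ _ h]
      simp [h, h']
    | succ j =>
      simp only [erun, List.length_append, List.getD_append _ _ _ _ h, ih j (by omega)]
      simp [h, h']

lemma ifmax (l : List Int) : ∀ c, l.foldl (fun b v => if b < v then v else b) c = l.foldl max c := by
  induction l with
  | nil => intro c; rfl
  | cons v vs ih =>
    intro c
    simp only [List.foldl_cons, ih]
    congr 1
    omega

lemma erun_step (a b : List Int) (dA dB T : Nat) (h0 : dA = 0 ∨ dB = 0)
    (hA : dA + T < a.length) (hB : dB + T < b.length) :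
    erun a b (dA + T) (dB + T)
      = if a.getD (dA + T) 0 = b.getD (dB + T) 0 then
          (if T = 0 then 0 else erun a b (dA + (T - 1)) (dB + (T - 1))) + 1
        else 0 := by
  have hA' : dA + T < a.length := hA
  have hB' : dB + T < b.length := hB
  cases T with
  | zero =>
    rcases h0 with rfl | rfl
    · simp only [Nat.add_zero, Nat.zero_add] at *
      simp only [erun]
      simp [hA', hB']
    · simp only [Nat.add_zero, Nat.zero_add] at *
      cases dA with
      | zero => simp only [erun]; simp [hA', hB']
      | succ k => simp only [erun]; simp [hA', hB']
  | succ T =>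
    have e1 : dA + (T + 1) = (dA + T) + 1 := by omega
    have e2 : dB + (T + 1) = (dB + T) + 1 := by omega
    rw [e1, e2]
    simp only [erun]
    have h1 : (dA + T) + 1 < a.length := by omega
    have h2 : (dB + T) + 1 < b.length := by omega
    simp [h1, h2]

lemma maxA_inv (a b : List Int) (dA dB : Nat) (h0 : dA = 0 ∨ dB = 0) :
    ∀ T : Nat, dA + T ≤ a.length → dB + T ≤ b.length →
    ((List.range T).map (fun k : Nat => (k : Int))).foldl
      (fun (st : Int × Int) i =>
        if PySem.List.pyGet? a ((dA : Int) + i) = PySem.List.pyGet? b ((dB : Int) + i) then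
          (max st.1 (st.2 + 1), st.2 + 1)
        else (st.1, 0)) (0, 0)
    = ((List.range T).foldl (fun acc t => max acc (erun a b (dA + t) (dB + t))) 0,
       if T = 0 then 0 else erun a b (dA + (T - 1)) (dB + (T - 1))) := by
  intro T
  induction T with
  | zero => intro _ _; simp
  | succ T ih =>
    intro hA hB
    have hA' : dA + T ≤ a.length := by omega
    have hB' : dB + T ≤ b.length := by omega
    have haT : dA + T < a.length := by omega
    have hbT : dB + T < b.length := by omega
    rw [List.range_succ, List.map_append, List.foldl_append, List.foldl_append,
        ih hA' hB']
    have hget : (PySem.List.pyGet? a ((dA : Int) + (T : Int)) = PySem.List.pyGet? b ((dB : Int) + (T : Int)))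
        ↔ (a.getD (dA + T) 0 = b.getD (dB + T) 0) := by
      have c1 : (dA : Int) + (T : Int) = ((dA + T : Nat) : Int) := by push_cast; ring
      have c2 : (dB : Int) + (T : Int) = ((dB + T : Nat) : Int) := by push_cast; ring
      rw [c1, c2, PySem.List.pyGet?_natCast, PySem.List.pyGet?_natCast,
          List.getElem?_eq_getElem haT, List.getElem?_eq_getElem hbT,
          List.getD_eq_getElem _ _ haT, List.getD_eq_getElem _ _ hbT]
      simp
    have hrun := erun_step a b dA dB T h0 haT hbT
    have hspec0 : (0:Int) ≤ (List.range T).foldl (fun acc t => max acc (erun a b (dA + t) (dB + t))) 0 :=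
      (PySem.List.le_foldl_max_int _ _ _).1
    simp only [List.foldl_cons, List.foldl_nil, List.map_cons, List.map_nil]
    by_cases hc : a.getD (dA + T) 0 = b.getD (dB + T) 0
    · rw [if_pos (hget.mpr hc)]
      rw [if_pos hc] at hrun
      simp [hrun]
    · rw [if_neg (fun h => hc (hget.mp h))]
      rw [if_neg hc] at hrun
      simp [hrun, max_eq_left hspec0]

lemma maxA_eq (a b : List Int) (dA dB T : Nat) (h0 : dA = 0 ∨ dB = 0)
    (hA : dA + T ≤ a.length) (hB : dB + T ≤ b.length) :
    maxLengthA a b (dA : Int) (dB : Int) (T : Int)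
      = (List.range T).foldl (fun acc t => max acc (erun a b (dA + t) (dB + t))) 0 := by
  unfold maxLengthA
  rw [PySem.List.pyRange_one]
  have e : ((T : Int) - 0).toNat = T := by omega
  rw [e]
  have e2 : (List.range T).map (fun k : Nat => (0 : Int) + (k : Int))
      = (List.range T).map (fun k : Nat => (k : Int)) := by
    simp
  rw [e2, maxA_inv a b dA dB h0 T hA hB]

lemma row_eq (a b : List Int) (x : Int) :
    List.zipWith (fun y p => if x = y then p + 1 else 0) b
      (0 :: (List.range b.length).map (fun j => if a.length = 0 then 0 else erun a b (a.length - 1) j))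
    = (List.range b.length).map (fun j => erun (a ++ [x]) b a.length j) := by
  apply List.ext_getElem
  · simp
  · intro j hj hj2
    have hjb : j < b.length := by simpa using hj2
    rw [List.getElem_zipWith, List.getElem_map, List.getElem_range]
    have hbd : b.getD j 0 = b[j] := List.getD_eq_getElem _ _ hjb
    rw [← hbd]
    have hgx : (a ++ [x]).getD a.length 0 = x := by
      rw [List.getD_append_right _ _ _ _ (le_refl _)]
      simp
    by_cases hanil : a = []
    · subst hanil
      simp only [List.nil_append, List.length_nil] at hgx ⊢
      cases j with
      | zero =>
        rw [List.getElem_cons_zero]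
        simp only [erun]
        simp [hjb, hgx]
      | succ j' =>
        rw [List.getElem_cons_succ, List.getElem_map, List.getElem_range]
        simp only [erun]
        simp [hjb, hgx]
    · obtain ⟨i, hi⟩ : ∃ i, a.length = i + 1 :=
        ⟨a.length - 1, by cases a <;> simp_all⟩
      have hia : i < a.length := by omega
      cases j with
      | zero =>
        rw [List.getElem_cons_zero]
        rw [hi] at hgx ⊢
        simp only [erun]
        have c1 : i + 1 < (a ++ [x]).length := by simp; omega
        have hax2 : (a ++ [x])[i + 1] = x := by
          rw [← List.getD_eq_getElem _ _ c1]; exact hgx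
        simp [c1, hjb, hia, hax2]
      | succ j' =>
        rw [List.getElem_cons_succ, List.getElem_map, List.getElem_range]
        rw [hi] at hgx ⊢
        simp only [erun]
        have c1 : i + 1 < (a ++ [x]).length := by simp; omega
        rw [erun_append_left a [x] b i j' hia]
        have hax2 : (a ++ [x])[i + 1] = x := by
          rw [← List.getD_eq_getElem _ _ c1]; exact hgx
        simp [c1, hjb, hia, hax2]

lemma eMax_append (a b : List Int) (x : Int) :
    eMax (a ++ [x]) b
      = ((List.range b.length).map (fun j => erun (a ++ [x]) b a.length j)).foldl max (eMax a b) := by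
  unfold eMax
  have hl : (a ++ [x]).length = a.length + 1 := by simp
  rw [hl, List.range_succ, List.flatMap_append, List.foldl_append]
  have hpre : ((List.range a.length).flatMap (fun i => (List.range b.length).map (fun j => (i, j)))).foldl
      (fun acc p => max acc (erun (a ++ [x]) b p.1 p.2)) 0
      = ((List.range a.length).flatMap (fun i => (List.range b.length).map (fun j => (i, j)))).foldl
      (fun acc p => max acc (erun a b p.1 p.2)) 0 := by
    apply PySem.List.foldl_congr_mem
    intro acc p hp
    simp only [List.mem_flatMap, List.mem_map, List.mem_range] at hp
    obtain ⟨i, hi, j, hj, rfl⟩ := hp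
    rw [erun_append_left a [x] b i j hi]
  rw [hpre]
  have hsuf : ([a.length].flatMap (fun i => (List.range b.length).map (fun j => (i, j))))
      = (List.range b.length).map (fun j => (a.length, j)) := by simp
  rw [hsuf, List.foldl_map, List.foldl_map]

lemma B_inv (a b : List Int) :
    a.foldl
      (fun (st : List Int × Int) x =>
        let dp := List.zipWith (fun y p => if x = y then p + 1 else 0) b (0 :: st.1)
        (dp, dp.foldl (fun best v => if best < v then v else best) st.2))
      (List.replicate b.length 0, 0)
    = ((List.range b.length).map (fun j => if a.length = 0 then 0 else erun a b (a.length - 1) j),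
       eMax a b) := by
  induction a using List.reverseRecOn with
  | nil => simp [eMax]
  | append_singleton a x ih =>
    rw [List.foldl_append, ih]
    simp only [List.foldl_cons, List.foldl_nil]
    rw [row_eq a b x, ifmax, ← eMax_append a b x]
    simp

lemma fmax_le {α : Type} (l : List α) (f : α → Int) (c M : Int) (hc : c ≤ M)
    (h : ∀ x ∈ l, f x ≤ M) : l.foldl (fun acc x => max acc (f x)) c ≤ M := by
  induction l generalizing c with
  | nil => exact hc
  | cons y ys ih => exact ih _ (max_le hc (h y (by simp))) (fun x hx => h x (by simp [hx]))

lemma eMax_nonneg (a b : List Int) : 0 ≤ eMax a b :=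
  (PySem.List.le_foldl_max_int _ _ _).1

lemma eMax_ge (a b : List Int) (i j : Nat) (hi : i < a.length) (hj : j < b.length) :
    erun a b i j ≤ eMax a b := by
  refine (PySem.List.le_foldl_max_int _ (fun p => erun a b p.1 p.2) 0).2 (i, j) ?_
  simp only [List.mem_flatMap, List.mem_map, List.mem_range]
  exact ⟨i, hi, j, hj, rfl⟩

lemma eMax_le (a b : List Int) (M : Int) (h0 : 0 ≤ M)
    (h : ∀ i j, i < a.length → j < b.length → erun a b i j ≤ M) : eMax a b ≤ M := by
  refine fmax_le _ _ _ _ h0 ?_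
  intro p hp
  simp only [List.mem_flatMap, List.mem_map, List.mem_range] at hp
  obtain ⟨i, hi, j, hj, rfl⟩ := hp
  exact h i j hi hj

-- diagonal maxima, as plain range folds

def diag1 (a b : List Int) (k : Nat) : Int :=
  (List.range (min b.length (a.length - k))).foldl (fun acc t => max acc (erun a b (k + t) t)) 0

def diag2 (a b : List Int) (k : Nat) : Int :=
  (List.range (min a.length (b.length - k))).foldl (fun acc t => max acc (erun a b t (k + t))) 0

lemma A_eq_folds (a b : List Int) (ha : a ≠ []) (hb : b ≠ []) :
    findLength a b
      = (List.range b.length).foldl (fun ret k => max ret (diag2 a b k))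
          ((List.range a.length).foldl (fun ret k => max ret (diag1 a b k)) 0) := by
  unfold findLength
  rw [if_neg (by simp [ha, hb])]
  simp only []
  rw [PySem.List.pyRange_one, PySem.List.pyRange_one]
  have ea : ((a.length : Int) - 0).toNat = a.length := by omega
  have eb : ((b.length : Int) - 0).toNat = b.length := by omega
  rw [ea, eb, List.foldl_map, List.foldl_map]
  have h1 : ∀ ret : Int, ∀ k ∈ List.range a.length,
      max ret (maxLengthA a b ((0:Int) + (k:Int)) 0 (min (b.length:Int) ((a.length:Int) - ((0:Int) + (k:Int)))))
        = max ret (diag1 a b k) := by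
    intro ret k hk
    rw [List.mem_range] at hk
    have e1 : (0:Int) + (k:Int) = ((k:Nat) : Int) := by push_cast; ring
    have T := min b.length (a.length - k)
    have e2 : min (b.length:Int) ((a.length:Int) - (k:Int)) = ((min b.length (a.length - k) : Nat) : Int) := by
      omega
    rw [e1, e2]
    have h0' : ((0:Nat):Int) = (0:Int) := by norm_num
    rw [← h0']
    rw [maxA_eq a b k 0 (min b.length (a.length - k)) (Or.inr rfl) (by omega) (by omega)]
    unfold diag1
    simp
  have h2 : ∀ ret : Int, ∀ k ∈ List.range b.length,
      max ret (maxLengthA a b 0 ((0:Int) + (k:Int)) (min (a.length:Int) ((b.length:Int) - ((0:Int) + (k:Int)))))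
        = max ret (diag2 a b k) := by
    intro ret k hk
    rw [List.mem_range] at hk
    have e1 : (0:Int) + (k:Int) = ((k:Nat) : Int) := by push_cast; ring
    have e2 : min (a.length:Int) ((b.length:Int) - (k:Int)) = ((min a.length (b.length - k) : Nat) : Int) := by
      omega
    rw [e1, e2]
    have h0' : ((0:Nat):Int) = (0:Int) := by norm_num
    rw [← h0']
    rw [maxA_eq a b 0 k (min a.length (b.length - k)) (Or.inl rfl) (by omega) (by omega)]
    unfold diag2
    simp
  have r1 := PySem.List.foldl_congr_mem (l := List.range a.length) (init := (0:Int))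
      (f := fun ret (k : Nat) => max ret (maxLengthA a b ((0:Int) + (k:Int)) 0 (min (b.length:Int) ((a.length:Int) - ((0:Int)+(k:Int))))))
      (g := fun ret k => max ret (diag1 a b k)) (fun acc x hx => h1 acc x hx)
  rw [r1]
  have r2 := PySem.List.foldl_congr_mem (l := List.range b.length)
      (init := (List.range a.length).foldl (fun ret k => max ret (diag1 a b k)) 0)
      (f := fun ret (k : Nat) => max ret (maxLengthA a b 0 ((0:Int) + (k:Int)) (min (a.length:Int) ((b.length:Int) - ((0:Int)+(k:Int))))))
      (g := fun ret k => max ret (diag2 a b k)) (fun acc x hx => h2 acc x hx)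
  rw [r2]

lemma A_eq_eMax (a b : List Int) (ha : a ≠ []) (hb : b ≠ []) :
    findLength a b = eMax a b := by
  rw [A_eq_folds a b ha hb]
  apply le_antisymm
  · have hd1 : ∀ k ∈ List.range a.length, diag1 a b k ≤ eMax a b := by
      intro k _
      refine fmax_le _ _ _ _ (eMax_nonneg a b) ?_
      intro t ht
      rw [List.mem_range] at ht
      exact eMax_ge a b (k + t) t (by omega) (by omega)
    have hd2 : ∀ k ∈ List.range b.length, diag2 a b k ≤ eMax a b := by
      intro k _
      refine fmax_le _ _ _ _ (eMax_nonneg a b) ?_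
      intro t ht
      rw [List.mem_range] at ht
      exact eMax_ge a b t (k + t) (by omega) (by omega)
    exact fmax_le _ _ _ _ (fmax_le _ _ _ _ (eMax_nonneg a b) hd1) hd2
  · have hret1 : (0:Int) ≤ (List.range a.length).foldl (fun ret k => max ret (diag1 a b k)) 0 :=
      (PySem.List.le_foldl_max_int _ _ _).1
    have hmono : (List.range a.length).foldl (fun ret k => max ret (diag1 a b k)) 0
        ≤ (List.range b.length).foldl (fun ret k => max ret (diag2 a b k))
            ((List.range a.length).foldl (fun ret k => max ret (diag1 a b k)) 0) :=
      (PySem.List.le_foldl_max_int _ _ _).1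
    refine eMax_le a b _ (le_trans hret1 hmono) ?_
    intro i j hi hj
    by_cases hij : j ≤ i
    · have h1 : erun a b i j ≤ diag1 a b (i - j) := by
        have := (PySem.List.le_foldl_max_int (List.range (min b.length (a.length - (i - j))))
          (fun t => erun a b ((i - j) + t) t) 0).2 j (by rw [List.mem_range]; omega)
        have e : (i - j) + j = i := by omega
        rw [e] at this
        exact this
      have h2 : diag1 a b (i - j) ≤ (List.range a.length).foldl (fun ret k => max ret (diag1 a b k)) 0 :=
        (PySem.List.le_foldl_max_int _ _ _).2 (i - j) (by rw [List.mem_range]; omega)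
      exact le_trans h1 (le_trans h2 hmono)
    · have h1 : erun a b i j ≤ diag2 a b (j - i) := by
        have := (PySem.List.le_foldl_max_int (List.range (min a.length (b.length - (j - i))))
          (fun t => erun a b t ((j - i) + t)) 0).2 i (by rw [List.mem_range]; omega)
        have e : (j - i) + i = j := by omega
        rw [e] at this
        exact this
      have h2 : diag2 a b (j - i) ≤ (List.range b.length).foldl (fun ret k => max ret (diag2 a b k))
          ((List.range a.length).foldl (fun ret k => max ret (diag1 a b k)) 0) :=
        (PySem.List.le_foldl_max_int _ _ _).2 (j - i) (by rw [List.mem_range]; omega)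
      exact le_trans h1 h2

-- ===== VERDICT (by name: the statement is the Claim_ definition above) =====
theorem findLength_spec : Claim_equal_findLength := by
  intro a b _
  unfold Spec_findLength
  have halt : findLength_alt a b = eMax a b := by
    unfold findLength_alt
    rw [B_inv]
  rw [halt]
  by_cases h1 : a = []
  · subst h1; simp [findLength, eMax]
  by_cases h2 : b = []
  · subst h2
    have e : (List.flatMap (fun _ : Nat => ([] : List (Nat × Nat))) (List.range a.length)) = [] := by
      simp
    simp [findLength, eMax, e]
  · exact A_eq_eMax a b h1 h2
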